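-- pv_equiv track=rewrite | github.com/Anfany/Codility-Lessons-By-Python3 | L92_Tasks from Indeed Prime 2016 College Coders challenge/92.2_SocksLaundering.py | solution
-- ===== SOURCE A (Python) =====
-- def solution(K, C, D):
--     """
--     :param K: 洗衣机一次可以洗的袜子的最大只数
--     :param C: 干净袜子
--     :param D: 脏袜子
--     :return: 可以得到的最大的干净袜子的双数
--     """
--     # 首先获得干净袜子中的双数
--     pair_sock = 0
--     sock_dict = {}
--     for i in list(set(C)):
--         count = C.count(i)
--         pairs = count // 2
--         pair_sock += pairs
--         rest = count % 2
--         if rest: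
--             sock_dict[i] = 1
--
--     # 脏袜子
--     sock_dict_dark = {}
--     for j in D:
--         if j in sock_dict_dark:
--             sock_dict_dark[j] += 1
--         else:
--             sock_dict_dark[j] = 1
--
--     # 开始洗袜子
--     if K == 0:
--         return pair_sock
--     for h in sock_dict:
--         if h in sock_dict_dark:
--             pair_sock += 1
--             sock_dict_dark[h] -= 1
--             if sock_dict_dark[h] <= 1:
--                 del sock_dict_dark[h]
--             K -= 1
--             if K == 0:
--                 return pair_sock
--
--     #  计算sock_dict_dark里面的最大双数
--     if K < 2 or len(sock_dict_dark) == 0: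
--         return pair_sock
--
--     for r in sock_dict_dark:
--         number = sock_dict_dark[r]
--         n = number // 2
--         d = min(n, K // 2)
--         K -= 2 * d
--         pair_sock += d
--         if K <= 1:
--             break
--     return pair_sock
-- ===== SOURCE B (Python) =====
-- def _pair_adjacent(xs):
--     # xs sorted: greedily pair adjacent equal socks; leftovers are the singles
--     pairs = 0
--     singles = []
--     i = 0
--     n = len(xs)
--     while i < n:
--         if i + 1 < n and xs[i] == xs[i + 1]:
--             pairs += 1
--             i += 2
--         else:
--             singles.append(xs[i])
--             i += 1
--     return pairs, singles
--
--
-- def _remove_matched(singles, ds):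
--     # singles strictly increasing, ds sorted: drop one d-sock per single present
--     matched = 0
--     rest = []
--     i = 0
--     for x in ds:
--         while i < len(singles) and singles[i] < x:
--             i += 1
--         if i < len(singles) and singles[i] == x:
--             matched += 1
--             i += 1
--         else:
--             rest.append(x)
--     return matched, rest
--
--
-- def solution(K, C, D):
--     clean_pairs, singles = _pair_adjacent(sorted(C))
--     matched, rest = _remove_matched(singles, sorted(D))
--     if K <= matched:
--         return clean_pairs + K
--     dirty_pairs, _ = _pair_adjacent(rest)
--     return clean_pairs + matched + min(dirty_pairs, (K - matched) // 2)
-- ===== Notes on version B (the rewrite author's own statement) =====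
-- stated objective: faster
-- what changed: Replaces A's hash-map greedy (per-color C.count rescans into dicts, a budget-decrementing wash loop with early returns, then a budgeted dirty-pair loop) by sort-and-scan: pair adjacent equal socks in sorted C, remove one dirty sock per leftover single with a two-pointer merge against sorted D, pair the remaining dirty socks the same way, and finish with one arithmetic formula.
-- outside the precondition, e.g. on solution(-1, [1], [1]): A returns 1, B returns -1
import Mathlib
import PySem

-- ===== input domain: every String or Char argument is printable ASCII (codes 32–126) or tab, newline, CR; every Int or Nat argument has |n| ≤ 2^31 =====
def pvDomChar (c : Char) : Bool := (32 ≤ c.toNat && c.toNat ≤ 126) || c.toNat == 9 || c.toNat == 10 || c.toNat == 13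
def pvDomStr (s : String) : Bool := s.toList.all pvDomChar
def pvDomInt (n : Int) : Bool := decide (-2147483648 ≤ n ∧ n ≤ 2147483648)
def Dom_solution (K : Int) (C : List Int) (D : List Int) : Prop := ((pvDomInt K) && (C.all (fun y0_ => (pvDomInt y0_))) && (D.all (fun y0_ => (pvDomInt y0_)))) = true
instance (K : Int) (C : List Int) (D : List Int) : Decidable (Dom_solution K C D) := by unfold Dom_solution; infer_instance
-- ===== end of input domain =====

-- B replaces A's dict-based counting and budget-decrementing wash loops by sort-and-scan:
-- pair adjacent equal socks in sorted C, merge the leftover singles against sorted D with a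
-- two-pointer sweep, pair the remaining dirty socks, and finish with one arithmetic formula
-- (objective: faster — sort-and-scan replaces A's per-distinct-color C.count rescans; the
-- timing run measured B ≥ 64x faster at n = 4096).

-- ===== PORT A =====
-- the dirty-pairs loop: 'for r in sock_dict_dark: …' (dict unchanged inside, so recursion over its keys)
def dirtyA (dark : PySem.Dict Int Int) : List Int → Int → Int → Int
  | [], pair_sock, _K => pair_sock
  | r :: rest, pair_sock, K =>
      let number := dark.getD r 0
      let n := PySem.Int.floordiv number 2
      let d := min n (PySem.Int.floordiv K 2)
      let K' := K - 2 * d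
      let pair_sock' := pair_sock + d
      if K' ≤ 1 then pair_sock' else dirtyA dark rest pair_sock' K'

-- the washing loop over sock_dict's keys; the [] case is the code after the loop
def washA : List Int → Int → PySem.Dict Int Int → Int → Int
  | [], pair_sock, dark, K =>
      if K < 2 ∨ dark.size = 0 then pair_sock
      else dirtyA dark dark.keys pair_sock K
  | h :: t, pair_sock, dark, K =>
      if dark.contains h then
        let pair_sock' := pair_sock + 1
        let dark1 := dark.insert h (dark.getD h 0 - 1)
        let dark2 := if dark1.getD h 0 ≤ 1 then dark1.erase h else dark1
        let K' := K - 1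
        if K' = 0 then pair_sock' else washA t pair_sock' dark2 K'
      else washA t pair_sock dark K

def solution (K : Int) (C : List Int) (D : List Int) : Int :=
  let init := (PySem.Set.ofList C).foldl
    (fun (s : Int × PySem.Dict Int Int) i =>
      let count : Int := (C.count i : Int)
      let pairs := PySem.Int.floordiv count 2
      let pair_sock := s.1 + pairs
      let rest := PySem.Int.mod count 2
      if rest ≠ 0 then (pair_sock, s.2.insert i 1) else (pair_sock, s.2))
    (0, PySem.Dict.empty)
  let pair_sock := init.1
  let sock_dict := init.2
  let sock_dict_dark := D.foldl
    (fun (d : PySem.Dict Int Int) j =>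
      if d.contains j then d.insert j (d.getD j 0 + 1) else d.insert j 1)
    PySem.Dict.empty
  if K = 0 then pair_sock
  else washA sock_dict.keys pair_sock sock_dict_dark K

-- ===== PORT B =====
-- _pair_adjacent's while loop: the index i becomes the current suffix of xs
def pairAdj : List Int → Int × List Int
  | [] => (0, [])
  | [x] => (0, [x])
  | x :: y :: rest =>
      if x == y then
        let p := pairAdj rest
        (p.1 + 1, p.2)
      else
        let p := pairAdj (y :: rest)
        (p.1, x :: p.2)

-- _remove_matched's 'for x in ds' loop; the singles pointer i becomes the current suffix of singles
def removeMatched : List Int → List Int → Int × List Int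
  | _, [] => (0, [])
  | sing, x :: ds =>
      match sing.dropWhile (fun s => decide (s < x)) with
      | [] =>
          let p := removeMatched ([] : List Int) ds
          (p.1, x :: p.2)
      | y :: t =>
          if y == x then
            let p := removeMatched t ds
            (p.1 + 1, p.2)
          else
            let p := removeMatched (y :: t) ds
            (p.1, x :: p.2)

def solution_alt (K : Int) (C : List Int) (D : List Int) : Int :=
  let p1 := pairAdj (PySem.List.sorted C (fun v => v) false)
  let clean_pairs := p1.1
  let singles := p1.2
  let p2 := removeMatched singles (PySem.List.sorted D (fun v => v) false)
  let matched := p2.1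
  let rest := p2.2
  if K ≤ matched then clean_pairs + K
  else clean_pairs + matched + min (pairAdj rest).1 (PySem.Int.floordiv (K - matched) 2)

-- ===== PRECONDITION & SPEC =====
-- Pre_ restricts to the task's natural domain of a nonnegative washing capacity K: a negative K is a
-- meaningless count, on which A still "washes" singles for free (see the cite in claim.json).
def Pre_solution (K : Int) (C : List Int) (D : List Int) : Prop := 0 ≤ K
instance (K : Int) (C : List Int) (D : List Int) : Decidable (Pre_solution K C D) := by unfold Pre_solution; infer_instance
def pvWitness_solution : Int × List Int × List Int := (2, [1, 1, 2], [2, 3])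

def Spec_solution (K : Int) (C : List Int) (D : List Int) (out : Int) : Prop := out = solution_alt K C D
instance (K : Int) (C : List Int) (D : List Int) (out : Int) : Decidable (Spec_solution K C D out) := by unfold Spec_solution; infer_instance

-- ===== CLAIM (what is proved, stated in full; the proofs are below) =====
def Claim_equal_solution : Prop := ∀ (K : Int) (C : List Int) (D : List Int), Dom_solution K C D → Pre_solution K C D → Spec_solution K C D (solution K C D)

-- ===== LEMMAS AND PROOFS =====

-- the common middle form both programs are reduced to
def Fmid (K clean M dirty : Int) : Int :=
  if K ≤ M then clean + K else clean + M + min dirty (PySem.Int.floordiv (K - M) 2)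

def cleanOf (C : List Int) : Int :=
  ((PySem.Set.ofList C).map (fun i => PySem.Int.floordiv ((C.count i : Nat) : Int) 2)).sum

def oddsOf (C : List Int) : List Int :=
  (PySem.Set.ofList C).filter (fun i => decide (PySem.Int.mod ((C.count i : Nat) : Int) 2 ≠ 0))

def matchedOf (C D : List Int) : List Int :=
  (oddsOf C).filter (fun h => (PySem.Dict.counter D).contains h)

-- adjusted dirty-pairs sum: Σ over entries of ⌊(v - [k ∈ m])/2⌋
def sumAdj (l : List (Int × Int)) (m : List Int) : Int :=
  (l.map (fun p => PySem.Int.floordiv (p.2 - (if p.1 ∈ m then 1 else 0)) 2)).sum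

def dirtyOf (C D : List Int) : Int := sumAdj (PySem.Dict.counter D).items (matchedOf C D)

theorem floordiv_two_eq (a : Int) : PySem.Int.floordiv a 2 = a / 2 :=
  PySem.Int.floordiv_eq_ediv_of_pos (by norm_num)

theorem sumAdj_nil (l : List (Int × Int)) :
    sumAdj l [] = (l.map (fun p => PySem.Int.floordiv p.2 2)).sum := by
  unfold sumAdj; simp

theorem sumAdj_nonneg (l : List (Int × Int)) (m : List Int)
    (h : ∀ p ∈ l, 1 ≤ p.2) : 0 ≤ sumAdj l m := by
  unfold sumAdj
  apply List.sum_nonneg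
  intro x hx
  simp only [List.mem_map] at hx
  obtain ⟨p, hp, rfl⟩ := hx
  rw [floordiv_two_eq]
  have := h p hp
  split <;> omega

theorem dirtyA_eq (dark : PySem.Dict Int Int) (keys : List Int) :
    ∀ (pair K : Int), 0 ≤ K → (∀ k ∈ keys, 0 ≤ dark.getD k 0) →
    dirtyA dark keys pair K =
      pair + min ((keys.map (fun k => PySem.Int.floordiv (dark.getD k 0) 2)).sum)
                 (PySem.Int.floordiv K 2) := by
  induction keys with
  | nil =>
      intro pair K hK _
      simp only [dirtyA, List.map_nil, List.sum_nil, floordiv_two_eq]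
      omega
  | cons r rest ih =>
      intro pair K hK hmem
      have hn : 0 ≤ dark.getD r 0 := hmem r (by simp)
      have hS : 0 ≤ ((rest.map (fun k => dark.getD k 0 / 2)).sum) := by
        apply List.sum_nonneg
        intro x hx
        simp only [List.mem_map] at hx
        obtain ⟨k, hk, rfl⟩ := hx
        have := hmem k (by simp [hk])
        omega
      simp only [dirtyA, List.map_cons, List.sum_cons]
      simp only [floordiv_two_eq]
      split_ifs with h
      · omega
      · rw [ih _ _ (by omega) (fun k hk => hmem k (by simp [hk]))]
        simp only [floordiv_two_eq]
        omega

theorem keys_erase_nodup (d : PySem.Dict Int Int) (k : Int) (h : d.keys.Nodup) :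
    (d.erase k).keys.Nodup := by
  have hsub : (d.erase k).items.Sublist d.items := List.filter_sublist
  have h' : (List.map (fun p : Int × Int => p.1) d.items).Nodup := h
  show ((d.erase k).items.map (fun p => p.1)).Nodup
  exact ((hsub.map (fun p : Int × Int => p.1)).nodup) h'

theorem contains_erase_of_ne (d : PySem.Dict Int Int) (h k : Int) (hne : k ≠ h) :
    (d.erase h).contains k = d.contains k := by
  show (List.filter (fun p => !(p.1 == h)) d.items).any (fun p => p.1 == k)
      = d.items.any (fun p => p.1 == k)
  rw [List.any_filter]
  apply PySem.List.any_congr_mem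
  intro p _
  by_cases hpk : p.1 = k
  · simp [hpk, hne]
  · simp [hpk]

theorem sum_map_filter_eq (f : Int × Int → Int) (h : Int) (l : List (Int × Int))
    (hz : ∀ p ∈ l, p.1 = h → f p = 0) :
    ((l.filter (fun p => !(p.1 == h))).map f).sum = (l.map f).sum := by
  induction l with
  | nil => rfl
  | cons p rest ih =>
      have ih' := ih (fun q hq hqh => hz q (by simp [hq]) hqh)
      by_cases hph : p.1 = h
      · simp [hph, ih', hz p (by simp) hph]
      · simp [hph, ih']

theorem sumAdj_insert (d : PySem.Dict Int Int) (h v : Int) (m : List Int)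
    (hnd : d.keys.Nodup) (hc : d.contains h = true) (hv : d.getD h 0 = v) (hm : h ∉ m) :
    sumAdj (d.insert h (v - 1)).items m = sumAdj d.items (h :: m) := by
  rw [PySem.Dict.items_insert_of_contains d _ hc]
  unfold sumAdj
  rw [List.map_map]
  apply congrArg List.sum
  apply List.map_congr_left
  intro p hp
  by_cases hph : p.1 = h
  · have hpv : p.2 = v := by
      have hmem : (h, p.2) ∈ d.items := by
        have heq : p = (p.1, p.2) := rfl
        rw [← hph]; exact hp
      have := PySem.Dict.getD_of_mem_items _ hmem hnd 0
      omega
    simp [Function.comp, hph, hpv, hm]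
  · simp [Function.comp, hph]

-- the wash loop: with m = matched singles, result is pair+K on K ≤ |m|, else pair+|m|+min(adjusted Σ, ⌊(K-|m|)/2⌋)
theorem washA_eq (keys : List Int) :
    ∀ (pair K : Int) (dark : PySem.Dict Int Int),
    keys.Nodup → dark.keys.Nodup → 1 ≤ K → (∀ p ∈ dark.items, 1 ≤ p.2) →
    washA keys pair dark K =
      (let m := keys.filter (fun h => dark.contains h)
       if K ≤ (m.length : Int) then pair + K
       else pair + m.length + min (sumAdj dark.items m)
              (PySem.Int.floordiv (K - m.length) 2)) := by
  induction keys with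
  | nil =>
      intro pair K dark _ hnd hK hval
      have hg : ∀ k ∈ dark.keys, 0 ≤ dark.getD k 0 := by
        intro k hk
        simp only [PySem.Dict.keys, List.mem_map] at hk
        obtain ⟨p, hp, rfl⟩ := hk
        have hmem : (p.1, p.2) ∈ dark.items := hp
        have := PySem.Dict.getD_of_mem_items _ hmem hnd 0
        have := hval p hp
        omega
      have hSeq : ((dark.keys.map (fun k => PySem.Int.floordiv (dark.getD k 0) 2)).sum)
          = sumAdj dark.items [] := by
        rw [sumAdj_nil, PySem.Dict.items_eq_map_keys dark hnd 0, List.map_map]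
        rfl
      have hS0 : 0 ≤ sumAdj dark.items [] := sumAdj_nonneg _ _ hval
      simp only [washA, List.filter_nil, List.length_nil, Int.natCast_zero]
      rw [if_neg (show ¬ (K ≤ (0:Int)) by omega)]
      split_ifs with hcond
      · obtain h2 | h0 := hcond
        · rw [floordiv_two_eq, Int.min_def]
          split_ifs <;> omega
        · have hit : dark.items = [] := List.length_eq_zero_iff.mp h0
          rw [floordiv_two_eq]
          simp only [hit, sumAdj, List.map_nil, List.sum_nil]
          rw [Int.min_def]
          split_ifs <;> omega
      · rw [dirtyA_eq dark dark.keys pair K (by omega) hg, hSeq, floordiv_two_eq,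
            floordiv_two_eq]
        omega
  | cons h t ih =>
      intro pair K dark hndk hnd hK hval
      by_cases hc : dark.contains h = true
      · have hmemk : h ∈ dark.keys := (PySem.Dict.contains_iff_mem_keys dark h).mp hc
        obtain ⟨p, hp, hph⟩ := List.mem_map.mp hmemk
        have hpmem : (h, p.2) ∈ dark.items := by
          rw [← hph]; exact hp
        have hgv : dark.getD h 0 = p.2 := PySem.Dict.getD_of_mem_items _ hpmem hnd 0
        have hv1 : 1 ≤ p.2 := hval p hp
        have hht : h ∉ t := (List.nodup_cons.mp hndk).1
        have hfilter : (h :: t).filter (fun x => dark.contains x)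
            = h :: t.filter (fun x => dark.contains x) := by
          rw [List.filter_cons_of_pos hc]
        simp only [washA, hc, if_true, hfilter]
        set mt := t.filter (fun x => dark.contains x) with hmt
        have hhmt : h ∉ mt := fun hx => hht (List.mem_of_mem_filter hx)
        have hndt : t.Nodup := (List.nodup_cons.mp hndk).2
        have hsum1 : sumAdj (dark.insert h (dark.getD h 0 - 1)).items mt
            = sumAdj dark.items (h :: mt) :=
          sumAdj_insert dark h (dark.getD h 0) mt hnd hc rfl hhmt
        have hlen : ((h :: mt).length : Int) = (mt.length : Int) + 1 := by
          simp [List.length_cons]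
        by_cases hK1 : K - 1 = 0
        · rw [if_pos hK1, if_pos (by rw [hlen]; omega)]
          omega
        · rw [if_neg hK1]
          have hd1nd : (dark.insert h (dark.getD h 0 - 1)).keys.Nodup :=
            PySem.Dict.nodup_keys_insert dark h _ hnd
          have hd1items := PySem.Dict.items_insert_of_contains dark (dark.getD h 0 - 1) hc
          have hd1mem : ∀ q ∈ (dark.insert h (dark.getD h 0 - 1)).items,
              q = (h, dark.getD h 0 - 1) ∨ (q ∈ dark.items ∧ q.1 ≠ h) := by
            intro q hq
            rw [hd1items] at hq
            obtain ⟨r, hr, hrq⟩ := List.mem_map.mp hq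
            by_cases hrh : r.1 = h
            · left; rw [← hrq]; simp [hrh]
            · right
              rw [← hrq]
              simp only [beq_iff_eq, hrh, if_false]
              exact ⟨hr, hrh⟩
          have hcont1 : ∀ k ∈ t, (dark.insert h (dark.getD h 0 - 1)).contains k
              = dark.contains k := by
            intro k hk
            have hkh : ¬ (k == h) = true := by
              simp only [beq_iff_eq]
              intro hkh; exact hht (hkh ▸ hk)
            rw [PySem.Dict.contains_insert]
            simp [hkh]
          rw [PySem.Dict.getD_insert_self]
          by_cases hdel : dark.getD h 0 - 1 ≤ 1
          · rw [if_pos hdel]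
            set dark2 := (dark.insert h (dark.getD h 0 - 1)).erase h with hdark2
            have hnd2 : dark2.keys.Nodup := keys_erase_nodup _ h hd1nd
            have hval2 : ∀ q ∈ dark2.items, 1 ≤ q.2 := by
              intro q hq
              have hq' : q ∈ (dark.insert h (dark.getD h 0 - 1)).items ∧ ¬(q.1 == h) = true := by
                have := List.mem_filter.mp hq
                simpa using this
              obtain hcase | ⟨hqmem, _⟩ := hd1mem q hq'.1
              · exfalso; apply hq'.2; rw [hcase]; simp
              · exact hval q hqmem
            have hcont2 : ∀ k ∈ t, dark2.contains k = dark.contains k := by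
              intro k hk
              have hkh : k ≠ h := fun hkh => hht (hkh ▸ hk)
              rw [hdark2, contains_erase_of_ne _ h k hkh, hcont1 k hk]
            have hfilt2 : t.filter (fun x => dark2.contains x) = mt := by
              rw [hmt]; exact List.filter_congr (fun k hk => by rw [hcont2 k hk])
            have hsum2 : sumAdj dark2.items mt = sumAdj dark.items (h :: mt) := by
              rw [← hsum1, hdark2]
              show sumAdj (List.filter (fun q => !(q.1 == h))
                  (dark.insert h (dark.getD h 0 - 1)).items) mt = _
              unfold sumAdj
              apply sum_map_filter_eq
              intro q hq hqh
              obtain hcase | ⟨_, hne⟩ := hd1mem q hq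
              · rw [hcase]
                simp only [hhmt]
                rw [floordiv_two_eq]
                have : ¬ ((h:Int) ∈ mt) := hhmt
                simp only [if_false]
                omega
              · exact absurd hqh hne
            rw [ih (pair + 1) (K - 1) dark2 hndt hnd2 (by omega) hval2]
            simp only [hfilt2, hsum2, hlen]
            have harith : K - 1 - (mt.length : Int) = K - ((mt.length : Int) + 1) := by ring
            rw [harith]
            split_ifs <;> omega
          · rw [if_neg hdel]
            set dark2 := dark.insert h (dark.getD h 0 - 1) with hdark2
            have hval2 : ∀ q ∈ dark2.items, 1 ≤ q.2 := by
              intro q hq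
              obtain hcase | ⟨hqmem, _⟩ := hd1mem q hq
              · rw [hcase]; simp; omega
              · exact hval q hqmem
            have hfilt2 : t.filter (fun x => dark2.contains x) = mt := by
              rw [hmt]; exact List.filter_congr (fun k hk => by rw [hcont1 k hk])
            rw [ih (pair + 1) (K - 1) dark2 hndt hd1nd (by omega) hval2]
            simp only [hfilt2, hsum1, hlen]
            have harith : K - 1 - (mt.length : Int) = K - ((mt.length : Int) + 1) := by ring
            rw [harith]
            split_ifs <;> omega
      · simp only [washA, hc, if_false, Bool.false_eq_true]
        rw [ih pair K dark (List.nodup_cons.mp hndk).2 hnd hK hval]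
        rw [List.filter_cons_of_neg (by simp [hc])]

-- A reduces to the middle form
theorem solA_formula (K : Int) (C : List Int) (D : List Int) (hK : 0 ≤ K) :
    solution K C D = Fmid K (cleanOf C) ((matchedOf C D).length : Int) (dirtyOf C D) := by
  simp only [solution, Fmid, cleanOf, dirtyOf, matchedOf, oddsOf]
  have hdark : D.foldl (fun d j => if d.contains j then d.insert j (d.getD j 0 + 1)
      else d.insert j 1) PySem.Dict.empty = PySem.Dict.counter D := by
    rw [PySem.List.foldl_congr_mem D _ (fun d x => d.insert x (d.getD x 0 + 1))
        PySem.Dict.empty ?_]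
    · exact PySem.Dict.foldl_insert_getD_add_one_eq_counter D
    · intro acc x _
      by_cases hc : acc.contains x = true
      · rw [if_pos hc]
      · rw [if_neg (by simp [hc])]
        show acc.insert x 1 = acc.insert x (acc.getD x 0 + 1)
        rw [PySem.Dict.getD_of_not_contains acc 0 (by simp [hc])]
        norm_num
  rw [hdark]
  have hsplit : (PySem.Set.ofList C).foldl
      (fun (s : Int × PySem.Dict Int Int) i =>
        if PySem.Int.mod ((C.count i : Nat) : Int) 2 ≠ 0 then
          (s.1 + PySem.Int.floordiv ((C.count i : Nat) : Int) 2, s.2.insert i 1)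
        else (s.1 + PySem.Int.floordiv ((C.count i : Nat) : Int) 2, s.2))
      (0, PySem.Dict.empty)
      = ((PySem.Set.ofList C).foldl
           (fun a i => a + PySem.Int.floordiv ((C.count i : Nat) : Int) 2) 0,
         (PySem.Set.ofList C).foldl
           (fun (d : PySem.Dict Int Int) i =>
             if PySem.Int.mod ((C.count i : Nat) : Int) 2 ≠ 0 then d.insert i 1 else d)
           PySem.Dict.empty) := by
    rw [← PySem.List.foldl_prod_mk
        (f := fun a i => a + PySem.Int.floordiv ((C.count i : Nat) : Int) 2)
        (g := fun (d : PySem.Dict Int Int) i =>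
          if PySem.Int.mod ((C.count i : Nat) : Int) 2 ≠ 0 then d.insert i 1 else d)]
    apply PySem.List.foldl_congr_mem
    intro acc x _
    by_cases hr : PySem.Int.mod ((C.count x : Nat) : Int) 2 ≠ 0
    · rw [if_pos hr, if_pos hr]
    · rw [if_neg hr, if_neg hr]
  rw [hsplit]
  rw [PySem.List.foldl_add (l := PySem.Set.ofList C)
      (g := fun i => PySem.Int.floordiv ((C.count i : Nat) : Int) 2) (a := 0)]
  rw [PySem.List.foldl_ite_eq_foldl_filter
      (p := fun i => PySem.Int.mod ((C.count i : Nat) : Int) 2 ≠ 0)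
      (f := fun (d : PySem.Dict Int Int) i => d.insert i 1)]
  set ded := PySem.Set.ofList C with hded
  set sList := ded.filter (fun i => decide (PySem.Int.mod ((C.count i : Nat) : Int) 2 ≠ 0))
    with hsList
  have hsnodup : sList.Nodup := (PySem.Set.nodup_ofList C).filter _
  have hit : (sList.foldl (fun (d : PySem.Dict Int Int) i => d.insert i 1)
      PySem.Dict.empty).items = sList.map (fun i => (i, (1 : Int))) := by
    have := PySem.Dict.items_foldl_insert_fresh (l := sList) (k := fun i => i)
      (v := fun _ => (1 : Int)) PySem.Dict.empty (fun a _ => by simp) (by simpa using hsnodup)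
    simpa using this
  have hkeys : (sList.foldl (fun (d : PySem.Dict Int Int) i => d.insert i 1)
      PySem.Dict.empty).keys = sList := by
    show ((sList.foldl (fun (d : PySem.Dict Int Int) i => d.insert i 1)
      PySem.Dict.empty).items.map (fun p => p.1)) = sList
    rw [hit, List.map_map]
    exact List.map_id sList
  rw [hkeys]
  set mlist := sList.filter (fun h => (PySem.Dict.counter D).contains h) with hmlist
  by_cases hK0 : K = 0
  · rw [if_pos hK0, if_pos (by rw [hK0]; have := Int.natCast_nonneg mlist.length; omega)]
    omega
  · rw [if_neg hK0]
    have hvals : ∀ p ∈ (PySem.Dict.counter D).items, 1 ≤ p.2 := by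
      intro p hp
      rw [PySem.Dict.items_counter D] at hp
      obtain ⟨k, hk, rfl⟩ := List.mem_map.mp hp
      have : k ∈ D := (PySem.Set.mem_ofList D k).mp hk
      have := List.count_pos_iff.mpr this
      simp
      omega
    rw [washA_eq sList (0 + (ded.map (fun i => PySem.Int.floordiv ((C.count i : Nat) : Int) 2)).sum)
        K (PySem.Dict.counter D) hsnodup (PySem.Dict.nodup_keys_counter D) (by omega) hvals]
    simp only [← hmlist]
    split_ifs <;> omega

-- ----- B-side characterizations -----

theorem pairAdj_spec : ∀ (xs : List Int), xs.Pairwise (· ≤ ·) →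
    (pairAdj xs).1 = ((∑ c ∈ xs.toFinset, xs.count c / 2 : Nat) : Int) ∧
    (pairAdj xs).2.Pairwise (· < ·) ∧
    (∀ c : Int, c ∈ (pairAdj xs).2 ↔ xs.count c % 2 = 1) := by
  intro xs
  induction xs using pairAdj.induct with
  | case1 =>
      intro _
      refine ⟨by simp [pairAdj], by simp [pairAdj], fun c => by simp [pairAdj]⟩
  | case2 x =>
      intro _
      refine ⟨?_, by simp [pairAdj], fun c => ?_⟩
      · simp [pairAdj, List.count_singleton]
      · simp only [pairAdj, List.mem_singleton, List.count_singleton]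
        by_cases hc : c = x
        · simp [hc]
        · simp [hc, Ne.symm hc]
  | case3 x y rest heq ih =>
      intro hp
      have hxy : x = y := by simpa using heq
      subst hxy
      have heval : pairAdj (x :: x :: rest) = ((pairAdj rest).1 + 1, (pairAdj rest).2) := by
        simp [pairAdj]
      rcases List.pairwise_cons.mp hp with ⟨_, hp1⟩
      rcases List.pairwise_cons.mp hp1 with ⟨_, hp2⟩
      obtain ⟨ih1, ih2, ih3⟩ := ih hp2
      have hcnt : ∀ c : Int, (x :: x :: rest).count c
          = rest.count c + (if c = x then 2 else 0) := by
        intro c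
        simp only [List.count_cons]
        by_cases hc : c = x
        · simp [hc]
        · simp [hc, Ne.symm hc]
      refine ⟨?_, ?_, ?_⟩
      · rw [heval]
        have htf : (x :: x :: rest).toFinset = insert x rest.toFinset := by
          simp
        rw [htf]
        by_cases hx : x ∈ rest.toFinset
        · rw [Finset.insert_eq_self.mpr hx]
          have hsum : (∑ c ∈ rest.toFinset, (x :: x :: rest).count c / 2)
              = (∑ c ∈ rest.toFinset, rest.count c / 2) + 1 := by
            have hpt : ∀ c ∈ rest.toFinset, (x :: x :: rest).count c / 2
                = rest.count c / 2 + (if c = x then 1 else 0) := by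
              intro c _
              rw [hcnt c]
              by_cases hc : c = x
              · rw [if_pos hc, if_pos hc]; omega
              · rw [if_neg hc, if_neg hc]; omega
            rw [Finset.sum_congr rfl hpt, Finset.sum_add_distrib,
                Finset.sum_ite_eq' rest.toFinset x (fun _ => 1), if_pos hx]
          rw [hsum, ih1]
          push_cast
          ring
        · rw [Finset.sum_insert hx]
          have hx0 : rest.count x = 0 := by
            rw [List.count_eq_zero]
            simpa using hx
          have hterm : (x :: x :: rest).count x / 2 = 1 := by
            rw [hcnt x, hx0]; simp
          have hrest : ∀ c ∈ rest.toFinset, (x :: x :: rest).count c / 2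
              = rest.count c / 2 := by
            intro c hc
            have hcx : c ≠ x := fun h => hx (h ▸ hc)
            rw [hcnt c, if_neg hcx]
            omega
          rw [hterm, Finset.sum_congr rfl hrest, ih1]
          push_cast
          ring
      · rw [heval]
        exact ih2
      · intro c
        rw [heval]
        show c ∈ (pairAdj rest).2 ↔ _
        rw [ih3 c, hcnt c]
        by_cases hc : c = x
        · rw [if_pos hc]; omega
        · rw [if_neg hc]; omega
  | case4 x y rest hne ih =>
      intro hp
      have hxy : x ≠ y := by simpa using hne
      have heval : pairAdj (x :: y :: rest)
          = ((pairAdj (y :: rest)).1, x :: (pairAdj (y :: rest)).2) := by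
        simp [pairAdj, hne]
      rcases List.pairwise_cons.mp hp with ⟨hxall, hp1⟩
      have hlt : x < y := lt_of_le_of_ne (hxall y (by simp)) hxy
      have hxmem : x ∉ y :: rest := by
        intro hm
        rcases List.mem_cons.mp hm with h | h
        · omega
        · rcases List.pairwise_cons.mp hp1 with ⟨hyall, _⟩
          exact absurd (hyall x h) (by omega)
      obtain ⟨ih1, ih2, ih3⟩ := ih hp1
      have hcnt : ∀ c : Int, (x :: y :: rest).count c
          = (y :: rest).count c + (if c = x then 1 else 0) := by
        intro c
        simp only [List.count_cons]
        by_cases hc : c = x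
        · simp [hc]
        · simp [hc, Ne.symm hc]
      have hx1 : (x :: y :: rest).count x = 1 := by
        rw [hcnt x, List.count_eq_zero.mpr hxmem]
        simp
      refine ⟨?_, ?_, ?_⟩
      · rw [heval]
        have hxtf : x ∉ (y :: rest).toFinset := by simpa using hxmem
        have htf : (x :: y :: rest).toFinset = insert x (y :: rest).toFinset := by
          simp
        rw [htf, Finset.sum_insert hxtf, hx1]
        have hrest : ∀ c ∈ (y :: rest).toFinset, (x :: y :: rest).count c / 2
            = (y :: rest).count c / 2 := by
          intro c hc
          have hcx : c ≠ x := fun h => hxtf (h ▸ hc)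
          rw [hcnt c, if_neg hcx]
          omega
        rw [Finset.sum_congr rfl hrest, ih1]
        push_cast
        ring
      · rw [heval]
        refine List.pairwise_cons.mpr ⟨?_, ih2⟩
        intro z hz
        have hzmem : z ∈ y :: rest := by
          have := (ih3 z).mp hz
          exact List.count_pos_iff.mp (by omega)
        have hzx : z ≠ x := fun h => hxmem (h ▸ hzmem)
        have := hxall z hzmem
        omega
      · intro c
        rw [heval]
        rw [List.mem_cons, ih3 c, hcnt c]
        by_cases hc : c = x
        · subst hc
          rw [List.count_eq_zero.mpr hxmem]
          simp
        · simp [hc]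

theorem removeMatched_spec : ∀ (ds sing : List Int), sing.Pairwise (· < ·) → ds.Pairwise (· ≤ ·) →
    (removeMatched sing ds).1 = ((sing.filter (fun s => decide (s ∈ ds))).length : Int) ∧
    (removeMatched sing ds).2.Pairwise (· ≤ ·) ∧
    (∀ c : Int, (((removeMatched sing ds).2.count c : Nat) : Int)
        = ((ds.count c : Nat) : Int) - (if c ∈ sing ∧ c ∈ ds then 1 else 0)) := by
  intro ds
  induction ds with
  | nil =>
      intro sing _ _
      refine ⟨by simp [removeMatched], by simp [removeMatched], fun c => by simp [removeMatched]⟩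
  | cons x ds ih =>
      intro sing hsing hds
      rcases List.pairwise_cons.mp hds with ⟨hxle, hds'⟩
      have htd := List.takeWhile_append_dropWhile (p := fun s : Int => decide (s < x)) (l := sing)
      have htw : ∀ s ∈ sing.takeWhile (fun s : Int => decide (s < x)), s < x :=
        fun s hs => by simpa using List.mem_takeWhile_imp hs
      have htw_not : ∀ s ∈ sing.takeWhile (fun s : Int => decide (s < x)), s ∉ x :: ds := by
        intro s hs hm
        have hsx := htw s hs
        rcases List.mem_cons.mp hm with h | h
        · omega
        · exact absurd (hxle s h) (by omega)
      cases hdw : sing.dropWhile (fun s : Int => decide (s < x)) with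
      | nil =>
          have hsing_eq : sing.takeWhile (fun s : Int => decide (s < x)) = sing := by
            conv_rhs => rw [← htd, hdw]
            rw [List.append_nil]
          have hnot : ∀ s ∈ sing, s ∉ x :: ds := by
            intro s hs
            exact htw_not s (by rw [hsing_eq]; exact hs)
          have heval : removeMatched sing (x :: ds) =
              ((removeMatched [] ds).1, x :: (removeMatched [] ds).2) := by
            simp only [removeMatched, hdw]
          obtain ⟨ih1, ih2, ih3⟩ := ih [] (by simp) hds'
          refine ⟨?_, ?_, ?_⟩
          · rw [heval]
            have hfe : sing.filter (fun s => decide (s ∈ x :: ds)) = [] := by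
              rw [List.filter_eq_nil_iff]
              intro a ha
              simpa using hnot a ha
            rw [hfe, ih1]
            simp
          · rw [heval]
            refine List.pairwise_cons.mpr ⟨?_, ih2⟩
            intro z hz
            have hzc : 0 < (removeMatched [] ds).2.count z := List.count_pos_iff.mpr hz
            have h3 := ih3 z
            simp only [List.not_mem_nil, false_and, if_false] at h3
            have hzds : z ∈ ds := List.count_pos_iff.mp (by omega)
            exact hxle z hzds
          · intro c
            rw [heval]
            have h3 := ih3 c
            simp only [List.not_mem_nil, false_and, if_false] at h3
            have hind : ¬(c ∈ sing ∧ c ∈ x :: ds) := fun ⟨h1, h2⟩ => hnot c h1 h2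
            rw [if_neg hind]
            by_cases hc : c = x
            · subst hc
              rw [List.count_cons_self, List.count_cons_self]
              push_cast
              omega
            · rw [List.count_cons_of_ne (Ne.symm hc), List.count_cons_of_ne (Ne.symm hc)]
              omega
      | cons y t =>
          have hsub : (y :: t).Sublist sing := by
            rw [← hdw]
            exact List.dropWhile_sublist _
          have hsing' : (y :: t).Pairwise (· < ·) := hsing.sublist hsub
          have hyt : ∀ z ∈ t, y < z := (List.pairwise_cons.mp hsing').1
          have hsing_sub : ∀ s ∈ y :: t, s ∈ sing := fun s hs => hsub.subset hs
          have hyx : ¬ (y < x) := by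
            have hne : sing.dropWhile (fun s : Int => decide (s < x)) ≠ [] := by
              rw [hdw]; simp
            have hh := List.head_dropWhile_not (fun s : Int => decide (s < x)) hne
            have hy : (sing.dropWhile (fun s : Int => decide (s < x))).head hne = y := by
              rw [List.head_eq_iff_head?_eq_some, hdw]
              rfl
            rw [hy] at hh
            simpa using hh
          have hmem_split : ∀ s ∈ sing, s ∈ sing.takeWhile (fun s : Int => decide (s < x))
              ∨ s ∈ y :: t := by
            intro s hs
            have : s ∈ sing.takeWhile (fun s : Int => decide (s < x))
                ++ sing.dropWhile (fun s : Int => decide (s < x)) := by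
              rw [htd]; exact hs
            rw [hdw] at this
            exact List.mem_append.mp this
          by_cases hyxeq : y = x
          · -- matched single: consume y = x
            subst hyxeq
            have heval : removeMatched sing (y :: ds) =
                ((removeMatched t ds).1 + 1, (removeMatched t ds).2) := by
              simp only [removeMatched, hdw]
              simp
            obtain ⟨ih1, ih2, ih3⟩ := ih t (List.pairwise_cons.mp hsing').2 hds'
            have hynotT : y ∉ t := fun h => absurd (hyt y h) (lt_irrefl y)
            refine ⟨?_, ?_, ?_⟩
            · rw [heval, ih1]
              have hfs : sing.filter (fun s => decide (s ∈ y :: ds))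
                  = (sing.takeWhile (fun s : Int => decide (s < y))).filter
                      (fun s => decide (s ∈ y :: ds)) ++ (y :: t).filter (fun s => decide (s ∈ y :: ds)) := by
                conv_lhs => rw [← htd, hdw]
                rw [List.filter_append]
              have hftw : (sing.takeWhile (fun s : Int => decide (s < y))).filter
                  (fun s => decide (s ∈ y :: ds)) = [] := by
                rw [List.filter_eq_nil_iff]
                intro a ha
                simpa using htw_not a ha
              have hfyt : (y :: t).filter (fun s => decide (s ∈ y :: ds))
                  = y :: t.filter (fun s => decide (s ∈ ds)) := by
                rw [List.filter_cons_of_pos (by simp)]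
                congr 1
                apply List.filter_congr
                intro z hz
                have hzy : y < z := hyt z hz
                simp only [decide_eq_decide, List.mem_cons]
                constructor
                · rintro (h | h)
                  · omega
                  · exact h
                · exact fun h => Or.inr h
              rw [hfs, hftw, hfyt]
              simp only [List.nil_append, List.length_cons]
              push_cast
              ring
            · rw [heval]
              exact ih2
            · intro c
              rw [heval]
              have h3 := ih3 c
              by_cases hc : c = y
              · subst hc
                have hcs : c ∈ sing := hsing_sub c (by simp)
                rw [if_pos ⟨hcs, by simp⟩]
                rw [if_neg (by tauto)] at h3
                rw [List.count_cons_self]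
                push_cast at h3 ⊢
                omega
              · have hiff : (c ∈ sing ∧ c ∈ y :: ds) ↔ (c ∈ t ∧ c ∈ ds) := by
                  constructor
                  · rintro ⟨h1, h2⟩
                    have hcds : c ∈ ds := by
                      rcases List.mem_cons.mp h2 with h | h
                      · exact absurd h hc
                      · exact h
                    have hxc : y ≤ c := hxle c hcds
                    rcases hmem_split c h1 with h | h
                    · exact absurd (htw c h) (by omega)
                    · rcases List.mem_cons.mp h with h' | h'
                      · exact absurd h' hc
                      · exact ⟨h', hcds⟩
                  · rintro ⟨h1, h2⟩
                    exact ⟨hsing_sub c (List.mem_cons_of_mem _ h1), List.mem_cons_of_mem _ h2⟩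
                have hcount : (y :: ds).count c = ds.count c :=
                  List.count_cons_of_ne (Ne.symm hc)
                rw [hcount]
                by_cases hind : c ∈ t ∧ c ∈ ds
                · rw [if_pos (hiff.mpr hind)]
                  rw [if_pos hind] at h3
                  omega
                · rw [if_neg (fun h => hind (hiff.mp h))]
                  rw [if_neg hind] at h3
                  omega
          · -- y > x: x has no matching single
            have hxy : x < y := by omega
            have hgt : ∀ s ∈ y :: t, x < s := by
              intro s hs
              rcases List.mem_cons.mp hs with h | h
              · omega
              · have := hyt s h; omega
            have hxsing : x ∉ sing := by
              intro hx
              rcases hmem_split x hx with h | h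
              · exact absurd (htw x h) (lt_irrefl x)
              · exact absurd (hgt x h) (lt_irrefl x)
            have heval : removeMatched sing (x :: ds) =
                ((removeMatched (y :: t) ds).1, x :: (removeMatched (y :: t) ds).2) := by
              simp only [removeMatched, hdw]
              simp [hyxeq]
            obtain ⟨ih1, ih2, ih3⟩ := ih (y :: t) hsing' hds'
            refine ⟨?_, ?_, ?_⟩
            · rw [heval, ih1]
              have hfs : sing.filter (fun s => decide (s ∈ x :: ds))
                  = (sing.takeWhile (fun s : Int => decide (s < x))).filter
                      (fun s => decide (s ∈ x :: ds)) ++ (y :: t).filter (fun s => decide (s ∈ x :: ds)) := by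
                conv_lhs => rw [← htd, hdw]
                rw [List.filter_append]
              have hftw : (sing.takeWhile (fun s : Int => decide (s < x))).filter
                  (fun s => decide (s ∈ x :: ds)) = [] := by
                rw [List.filter_eq_nil_iff]
                intro a ha
                simpa using htw_not a ha
              have hfyt : (y :: t).filter (fun s => decide (s ∈ x :: ds))
                  = (y :: t).filter (fun s => decide (s ∈ ds)) := by
                apply List.filter_congr
                intro z hz
                have hzx : x < z := hgt z hz
                simp only [decide_eq_decide, List.mem_cons]
                constructor
                · rintro (h | h)
                  · omega
                  · exact h
                · exact fun h => Or.inr h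
              rw [hfs, hftw, hfyt, List.nil_append]
            · rw [heval]
              refine List.pairwise_cons.mpr ⟨?_, ih2⟩
              intro z hz
              have hzc : 0 < (removeMatched (y :: t) ds).2.count z := List.count_pos_iff.mpr hz
              have h3 := ih3 z
              have hzds : z ∈ ds := by
                apply List.count_pos_iff.mp
                by_cases hind : z ∈ y :: t ∧ z ∈ ds
                · rw [if_pos hind] at h3; omega
                · rw [if_neg hind] at h3; omega
              exact hxle z hzds
            · intro c
              rw [heval]
              have h3 := ih3 c
              by_cases hc : c = x
              · subst hc
                rw [if_neg (fun h => hxsing h.1)]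
                have hcyt : c ∉ y :: t := fun h => absurd (hgt c h) (lt_irrefl c)
                rw [if_neg (fun h => hcyt h.1)] at h3
                rw [List.count_cons_self, List.count_cons_self]
                push_cast at h3 ⊢
                omega
              · have hiff : (c ∈ sing ∧ c ∈ x :: ds) ↔ (c ∈ y :: t ∧ c ∈ ds) := by
                  constructor
                  · rintro ⟨h1, h2⟩
                    have hcds : c ∈ ds := by
                      rcases List.mem_cons.mp h2 with h | h
                      · exact absurd h hc
                      · exact h
                    have hxc : x ≤ c := hxle c hcds
                    rcases hmem_split c h1 with h | h
                    · exact absurd (htw c h) (by omega)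
                    · exact ⟨h, hcds⟩
                  · rintro ⟨h1, h2⟩
                    exact ⟨hsing_sub c h1, List.mem_cons_of_mem _ h2⟩
                have hcount1 : (x :: ds).count c = ds.count c :=
                  List.count_cons_of_ne (Ne.symm hc)
                have hcount2 : (x :: (removeMatched (y :: t) ds).2).count c
                    = (removeMatched (y :: t) ds).2.count c :=
                  List.count_cons_of_ne (Ne.symm hc)
                rw [hcount1, hcount2]
                by_cases hind : c ∈ y :: t ∧ c ∈ ds
                · rw [if_pos (hiff.mpr hind)]
                  rw [if_pos hind] at h3
                  omega
                · rw [if_neg (fun h => hind (hiff.mp h))]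
                  rw [if_neg hind] at h3
                  omega

-- B reduces to the same middle form
theorem solB_formula (K : Int) (C : List Int) (D : List Int) :
    solution_alt K C D = Fmid K (cleanOf C) ((matchedOf C D).length : Int) (dirtyOf C D) := by
  have hpC : (PySem.List.sorted C (fun v => v) false).Pairwise (· ≤ ·) :=
    PySem.List.sorted_pairwise C (fun v => v)
  have hpD : (PySem.List.sorted D (fun v => v) false).Pairwise (· ≤ ·) :=
    PySem.List.sorted_pairwise D (fun v => v)
  have hpermC : (PySem.List.sorted C (fun v => v) false).Perm C := PySem.List.sorted_perm C _ _
  have hpermD : (PySem.List.sorted D (fun v => v) false).Perm D := PySem.List.sorted_perm D _ _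
  set sC := PySem.List.sorted C (fun v => v) false with hsC
  set sD := PySem.List.sorted D (fun v => v) false with hsD
  have hcntC : ∀ c : Int, sC.count c = C.count c := fun c => hpermC.count_eq c
  have hcntD : ∀ c : Int, sD.count c = D.count c := fun c => hpermD.count_eq c
  have hmemD : ∀ c : Int, c ∈ sD ↔ c ∈ D := fun c => hpermD.mem_iff
  have htfC : sC.toFinset = C.toFinset := List.toFinset_eq_of_perm _ _ hpermC
  obtain ⟨hA1, hA2, hA3⟩ := pairAdj_spec sC hpC
  have hsingles_nodup : (pairAdj sC).2.Nodup := hA2.imp (fun h => ne_of_lt h)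
  have hmemS : ∀ c : Int, c ∈ (pairAdj sC).2 ↔ C.count c % 2 = 1 := by
    intro c
    rw [hA3 c, hcntC c]
  obtain ⟨hB1, hB2, hB3⟩ := removeMatched_spec sD (pairAdj sC).2 hA2 hpD
  -- membership characterizations of the A-side lists
  have hmemOdds : ∀ c : Int, c ∈ oddsOf C ↔ C.count c % 2 = 1 := by
    intro c
    unfold oddsOf
    rw [List.mem_filter]
    have hmod : PySem.Int.mod ((C.count c : Nat) : Int) 2 = ((C.count c % 2 : Nat) : Int) :=
      PySem.Int.mod_natCast (C.count c) 2
    constructor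
    · rintro ⟨_, hpred⟩
      rw [hmod] at hpred
      have h2 := Nat.mod_two_eq_zero_or_one (C.count c)
      simp only [decide_eq_true_eq] at hpred
      omega
    · intro hodd
      refine ⟨(PySem.Set.mem_ofList C c).mpr (List.count_pos_iff.mp (by omega)), ?_⟩
      rw [hmod]
      simp only [decide_eq_true_eq]
      omega
  have hmemM : ∀ c : Int, c ∈ matchedOf C D ↔ (C.count c % 2 = 1 ∧ c ∈ D) := by
    intro c
    unfold matchedOf
    rw [List.mem_filter, hmemOdds c, PySem.Dict.contains_counter]
    simp
  have hM_nodup : (matchedOf C D).Nodup :=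
    ((PySem.Set.nodup_ofList C).filter _).filter _
  -- (1) clean pairs agree
  have hclean : (pairAdj sC).1 = cleanOf C := by
    rw [hA1]
    have hsum : (∑ c ∈ sC.toFinset, sC.count c / 2) = ∑ c ∈ C.toFinset, C.count c / 2 := by
      rw [htfC]
      exact Finset.sum_congr rfl (fun c _ => by rw [hcntC c])
    rw [hsum]
    unfold cleanOf
    have hf : ((PySem.Set.ofList C).map
          (fun i => PySem.Int.floordiv ((C.count i : Nat) : Int) 2)).sum
        = ((PySem.Set.ofList C).map (fun i => ((C.count i / 2 : Nat) : Int))).sum := by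
      apply congrArg List.sum
      apply List.map_congr_left
      intro i _
      exact_mod_cast PySem.Int.floordiv_natCast (C.count i) 2
    rw [hf, ← List.sum_toFinset _ (PySem.Set.nodup_ofList C)]
    have htf2 : (PySem.Set.ofList C).toFinset = C.toFinset := by
      apply Finset.ext
      intro a
      simp [List.mem_toFinset, PySem.Set.mem_ofList]
    rw [htf2]
    push_cast
    rfl
  -- (2) matched counts agree
  have hM : (removeMatched (pairAdj sC).2 sD).1 = ((matchedOf C D).length : Int) := by
    rw [hB1]
    have hfil_nodup : ((pairAdj sC).2.filter (fun s => decide (s ∈ sD))).Nodup :=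
      hsingles_nodup.filter _
    have hmemF : ∀ c : Int, c ∈ (pairAdj sC).2.filter (fun s => decide (s ∈ sD))
        ↔ (C.count c % 2 = 1 ∧ c ∈ D) := by
      intro c
      rw [List.mem_filter, hmemS c]
      simp [hmemD c]
    have htfeq : ((pairAdj sC).2.filter (fun s => decide (s ∈ sD))).toFinset
        = (matchedOf C D).toFinset := by
      apply Finset.ext
      intro a
      simp only [List.mem_toFinset]
      rw [hmemF a, hmemM a]
    have hlen : ((pairAdj sC).2.filter (fun s => decide (s ∈ sD))).length
        = (matchedOf C D).length := by
      rw [← List.toFinset_card_of_nodup hfil_nodup, ← List.toFinset_card_of_nodup hM_nodup,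
          htfeq]
    rw [hlen]
  -- (3) dirty pairs agree
  have hdirty : (pairAdj (removeMatched (pairAdj sC).2 sD).2).1 = dirtyOf C D := by
    obtain ⟨hC1, _, _⟩ := pairAdj_spec (removeMatched (pairAdj sC).2 sD).2 hB2
    rw [hC1]
    set rest := (removeMatched (pairAdj sC).2 sD).2 with hrest
    have hind : ∀ c : Int, (c ∈ (pairAdj sC).2 ∧ c ∈ sD) ↔ c ∈ matchedOf C D := by
      intro c
      rw [hmemM c, hmemS c, hmemD c]
    -- rewrite the Int cast of the Nat sum as an Int sum
    have hcast : ((∑ c ∈ rest.toFinset, rest.count c / 2 : Nat) : Int)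
        = ∑ c ∈ rest.toFinset, ((rest.count c : Nat) : Int) / 2 := by
      push_cast
      rfl
    rw [hcast]
    have hsubset : rest.toFinset ⊆ D.toFinset := by
      intro c hc
      rw [List.mem_toFinset] at hc ⊢
      have hpos : 0 < rest.count c := List.count_pos_iff.mpr hc
      have h3 := hB3 c
      have : 0 < sD.count c := by
        by_cases hi : c ∈ (pairAdj sC).2 ∧ c ∈ sD
        · rw [if_pos hi] at h3; omega
        · rw [if_neg hi] at h3; omega
      exact (hmemD c).mp (List.count_pos_iff.mp this)
    have hext : (∑ c ∈ rest.toFinset, ((rest.count c : Nat) : Int) / 2)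
        = ∑ c ∈ D.toFinset, ((rest.count c : Nat) : Int) / 2 := by
      apply Finset.sum_subset hsubset
      intro c _ hc
      rw [List.mem_toFinset] at hc
      rw [List.count_eq_zero.mpr hc]
      rfl
    rw [hext]
    unfold dirtyOf sumAdj
    rw [PySem.Dict.items_counter D, List.map_map]
    have hmapped : ((PySem.Set.ofList D).map ((fun p : Int × Int =>
          PySem.Int.floordiv (p.2 - (if p.1 ∈ matchedOf C D then 1 else 0)) 2)
          ∘ (fun k => (k, ((List.count k D : Nat) : Int))))).sum
        = ∑ c ∈ D.toFinset, PySem.Int.floordiv (((D.count c : Nat) : Int)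
            - (if c ∈ matchedOf C D then 1 else 0)) 2 := by
      rw [← List.sum_toFinset _ (PySem.Set.nodup_ofList D)]
      have htf2 : (PySem.Set.ofList D).toFinset = D.toFinset := by
        apply Finset.ext
        intro a
        simp [List.mem_toFinset, PySem.Set.mem_ofList]
      rw [htf2]
      rfl
    rw [hmapped]
    apply Finset.sum_congr rfl
    intro c _
    rw [floordiv_two_eq]
    have h3 := hB3 c
    rw [hcntD c] at h3
    by_cases hi : c ∈ (pairAdj sC).2 ∧ c ∈ sD
    · rw [if_pos hi] at h3
      rw [if_pos ((hind c).mp hi)]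
      omega
    · rw [if_neg hi] at h3
      rw [if_neg (fun h => hi ((hind c).mpr h))]
      omega
  -- assemble
  simp only [solution_alt]
  rw [← hsC, ← hsD]
  rw [hclean, hM, hdirty]
  rfl

-- ===== VERDICT (by name: the statement is the Claim_ definition above) =====
theorem solution_spec : Claim_equal_solution := by
  intro K C D _ hpre
  show solution K C D = solution_alt K C D
  rw [solA_formula K C D hpre, solB_formula K C D]
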